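-- pv_equiv track=rewrite | github.com/JuanWet/TP_algoritmo | TP_1B.py | usar_la_fuerza
-- ===== SOURCE A (Python) =====
-- def usar_la_fuerza(lista,contador):
--     if len(lista)==0:
--         return -1
--     elif lista[-1]=="sable de luz":
--         return contador
--     else:
--         contador=contador+1
--         return usar_la_fuerza(lista[:-1],contador)
-- ===== SOURCE B (Python) =====
-- def usar_la_fuerza(lista, contador):
--     if "sable de luz" not in lista:
--         return -1
--     return contador + lista[::-1].index("sable de luz")
-- ===== Notes on version B (the rewrite author's own statement) =====
-- stated objective: faster
-- what changed: Replaces A's element-by-element tail recursion (which slices a new list copy at every step) with a membership test plus reversed-index arithmetic: the answer is contador + distance from the end to the last occurrence of 'sable de luz', or -1 if absent.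
import Mathlib
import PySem

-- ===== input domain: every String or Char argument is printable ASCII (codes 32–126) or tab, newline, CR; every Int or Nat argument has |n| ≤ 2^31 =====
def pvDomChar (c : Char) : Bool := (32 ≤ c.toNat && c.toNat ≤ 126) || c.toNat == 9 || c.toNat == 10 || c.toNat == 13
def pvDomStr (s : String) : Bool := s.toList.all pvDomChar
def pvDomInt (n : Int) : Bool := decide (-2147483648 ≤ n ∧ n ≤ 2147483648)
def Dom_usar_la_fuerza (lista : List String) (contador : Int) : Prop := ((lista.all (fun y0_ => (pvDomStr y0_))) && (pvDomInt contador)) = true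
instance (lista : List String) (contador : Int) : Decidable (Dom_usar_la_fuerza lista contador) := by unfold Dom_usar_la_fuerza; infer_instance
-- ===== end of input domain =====

-- B replaces A's per-element tail recursion (slicing a copy each step) with a
-- membership test plus reversed-index arithmetic (objective: faster).


-- ===== PORT A =====
def usar_la_fuerza (lista : List String) (contador : Int) : Int :=
  if lista.length == 0 then -1
  else if PySem.List.pyGet? lista (-1) == some "sable de luz" then contador
  else usar_la_fuerza (PySem.List.slice lista none (some (-1))) (contador + 1)
termination_by lista.length
decreasing_by
  simp only [PySem.List.slice_to_neg_one]
  have : lista.length ≠ 0 := by simpa using (by assumption : ¬ (lista.length == 0) = true)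
  simp [List.length_dropLast]; omega

-- ===== PORT B =====
def usar_la_fuerza_alt (lista : List String) (contador : Int) : Int :=
  if ¬ lista.contains "sable de luz" then -1
  else contador + ((PySem.List.index? lista.reverse "sable de luz").getD 0 : Int)

-- ===== PRECONDITION & SPEC =====
def Spec_usar_la_fuerza (lista : List String) (contador : Int) (out : Int) : Prop := out = usar_la_fuerza_alt lista contador
instance (lista : List String) (contador : Int) (out : Int) : Decidable (Spec_usar_la_fuerza lista contador out) := by unfold Spec_usar_la_fuerza; infer_instance

-- ===== CLAIM (what is proved, stated in full; the proofs are below) =====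
def Claim_equal_usar_la_fuerza : Prop := ∀ (lista : List String) (contador : Int), Dom_usar_la_fuerza lista contador → Spec_usar_la_fuerza lista contador (usar_la_fuerza lista contador)

-- ===== LEMMAS AND PROOFS =====

theorem usar_la_fuerza_eq_alt (lista : List String) (contador : Int) :
    usar_la_fuerza lista contador = usar_la_fuerza_alt lista contador := by
  induction lista using List.reverseRecOn generalizing contador with
  | nil => simp [usar_la_fuerza, usar_la_fuerza_alt]
  | append_singleton l x ih =>
    rw [usar_la_fuerza]
    by_cases hx : x = "sable de luz"
    · subst hx
      simp [usar_la_fuerza_alt, PySem.List.pyGet?_neg_one]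
    · have hlast : PySem.List.pyGet? (l ++ [x]) (-1) = some x := by
        simp [PySem.List.pyGet?_neg_one]
      rw [hlast]
      simp only [List.length_append, List.length_singleton, PySem.List.slice_to_neg_one,
        List.dropLast_concat]
      have hne : (l.length + 1 == 0) = false := by simp
      rw [hne, if_neg (by simp), if_neg (by simp [hx])]
      rw [ih]
      unfold usar_la_fuerza_alt
      by_cases hm : l.contains "sable de luz"
      · have hm' : ("sable de luz") ∈ l := by simpa using hm
        have hmx : (l ++ [x]).contains "sable de luz" = true := by simp [hm']
        rw [if_neg (by simp [hm']), if_neg (by simp [hm'])]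
        have hidx : ∃ k, PySem.List.index? l.reverse "sable de luz" = some k := by
          rcases Option.isSome_iff_exists.mp
            ((PySem.List.index?_isSome_iff l.reverse "sable de luz").mpr (by simpa using hm')) with ⟨k, hk⟩
          exact ⟨k, hk⟩
        rcases hidx with ⟨k, hk⟩
        have hcons : PySem.List.index? ((l ++ [x]).reverse) "sable de luz" = some (k + 1) := by
          rw [List.reverse_append]
          simp only [List.reverse_singleton, List.singleton_append]
          rw [PySem.List.index?_cons_of_ne l.reverse hx, hk]
          rfl
        rw [hk, hcons]
        simp; omega
      · have hm' : ("sable de luz") ∉ l := by simpa using hm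
        have hmx : ¬ ("sable de luz") ∈ (l ++ [x]) := by simp [hm', Ne.symm hx]
        rw [if_pos (by simpa using hm'), if_pos (by simpa using hmx)]

-- ===== VERDICT (by name: the statement is the Claim_ definition above) =====
theorem usar_la_fuerza_spec : Claim_equal_usar_la_fuerza := by
  intro lista contador _
  exact usar_la_fuerza_eq_alt lista contador
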